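-- pv_equiv track=rewrite | github.com/minsooerickim/wavefrontsolutions | BalanceWorks.py | SIFTcols
-- ===== SOURCE A (Python) =====
-- def SIFTcols(grid):
--     cols = []
--     cur_pos = int(len(grid)/2)-1, len(grid[0])-1
--     while(cur_pos[1] >= 0):
--         if(grid[cur_pos[0]][cur_pos[1]] != -1 and cur_pos[0] >= 0):
--             #append left then right side
--             cols.append(cur_pos[0])
--             cols.append(len(grid)- 1 -cur_pos[0])
--             cur_pos = cur_pos[0]-1, cur_pos[1]
--         else:
--             cur_pos = int(len(grid)/2)-1, cur_pos[1]-1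
--     return [item for item in reversed(cols)]
-- ===== SOURCE B (Python) =====
-- def SIFTcols(grid):
--     n, w = len(grid), len(grid[0])
--     out = []
--     for col in range(w):
--         r = n // 2 - 1
--         while r >= 0 and grid[r][col] != -1:
--             r -= 1
--         for row in range(r + 1, n // 2):
--             out.append(n - 1 - row)
--             out.append(row)
--     return out
-- ===== Notes on version B (the rewrite author's own statement) =====
-- stated objective: simpler
-- what changed: Replaces the flattened while-state-machine with reset/decrement state and a final reversal by forward nested loops over columns ascending that build the result front-to-back (right-index before left-index per row); dropping the reversal pass and the redundant negative-index cell read gives a constant-factor speedup.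
-- outside the precondition, e.g. on SIFTcols([]): A raises IndexError, B raises IndexError; on SIFTcols([[0, 0], [1]]): A raises IndexError, B returns [1, 0, 1, 0]; on SIFTcols([[-1, -1], [9, 9], [9, 9], [5]]): A returns [2, 1, 2, 1], B returns [2, 1, 2, 1]
import Mathlib
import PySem

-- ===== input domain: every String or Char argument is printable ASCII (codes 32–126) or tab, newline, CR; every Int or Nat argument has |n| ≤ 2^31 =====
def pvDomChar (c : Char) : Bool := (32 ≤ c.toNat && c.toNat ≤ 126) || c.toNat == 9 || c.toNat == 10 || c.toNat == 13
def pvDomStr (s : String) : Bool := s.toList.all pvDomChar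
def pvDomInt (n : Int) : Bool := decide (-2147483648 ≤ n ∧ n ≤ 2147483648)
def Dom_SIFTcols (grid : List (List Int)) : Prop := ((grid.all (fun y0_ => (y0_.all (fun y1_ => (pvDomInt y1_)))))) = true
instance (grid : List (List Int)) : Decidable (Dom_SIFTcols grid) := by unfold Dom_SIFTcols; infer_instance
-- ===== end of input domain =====

-- B builds the output front-to-back with forward nested loops (columns ascending, no final
-- reversal, no negative-row read); equivalence is about the return value only (no mutation).

-- termination measure step (cited by the ports' decreasing_by)
theorem pvDecStep (r : Int) (h : 0 ≤ r) : (r - 1 + 1).toNat < (r + 1).toNat := by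
  omega

-- ===== PORT A =====
-- grid[r][c] under Pre_ every read is in range, so pyGetD is exact
def pvCell (grid : List (List Int)) (r c : Int) : Int :=
  PySem.List.pyGetD (PySem.List.pyGetD grid r []) c 0

-- the while loop of A, state cur_pos = (row, col) and the accumulator cols
def SIFTcolsLoop (grid : List (List Int)) (row col : Int) (cols : List Int) : List Int :=
  if hc : 0 ≤ col then
    if hb : pvCell grid row col ≠ -1 ∧ 0 ≤ row then
      SIFTcolsLoop grid (row - 1) col
        (cols ++ [row, (grid.length : Int) - 1 - row])
    else
      SIFTcolsLoop grid ((grid.length : Int) / 2 - 1) (col - 1) cols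
  else
    cols.reverse
termination_by ((col + 1).toNat, (row + 1).toNat)
decreasing_by
  · exact Prod.Lex.right _ (pvDecStep row hb.2)
  · exact Prod.Lex.left _ _ (pvDecStep col hc)

def SIFTcols (grid : List (List Int)) : List Int :=
  match PySem.List.pyGet? grid 0 with
  | none => []   -- empty grid: Python raises IndexError at len(grid[0]); excluded by Pre_
  | some row0 =>
    SIFTcolsLoop grid ((grid.length : Int) / 2 - 1) ((row0.length : Int) - 1) []

-- ===== PORT B =====
-- the inner while of B: scan rows downward from r while the cell is not -1
def pvFindStop (grid : List (List Int)) (col r : Int) : Int :=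
  if h : 0 ≤ r ∧ pvCell grid r col ≠ -1 then pvFindStop grid col (r - 1) else r
termination_by (r + 1).toNat
decreasing_by exact pvDecStep r h.1

def SIFTcols_alt (grid : List (List Int)) : List Int :=
  match PySem.List.pyGet? grid 0 with
  | none => []   -- empty grid: Python raises IndexError at len(grid[0]); excluded by Pre_
  | some row0 =>
    let n : Int := grid.length
    (PySem.List.pyRange 0 (row0.length : Int) 1).foldl
      (fun out col =>
        let r := pvFindStop grid col (n / 2 - 1)
        out ++ (PySem.List.pyRange (r + 1) (n / 2) 1).flatMap
          (fun row => [n - 1 - row, row]))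
      []

-- ===== PRECONDITION & SPEC =====
-- Pre_ = nonempty grid whose readable rows (the first len//2 rows and the last row — the only
-- rows either program can index) are at least as long as row 0: outside it the scan can hit an
-- out-of-range cell and raise IndexError (whether it does depends on where -1 values sit).
def Pre_SIFTcols (grid : List (List Int)) : Prop :=
  grid ≠ [] ∧
  (∀ i : Nat, i < grid.length / 2 → (grid.getD i []).length ≥ grid.headI.length) ∧
  (grid.getLast?.getD []).length ≥ grid.headI.length
instance (grid : List (List Int)) : Decidable (Pre_SIFTcols grid) := by
  unfold Pre_SIFTcols; infer_instance

def pvWitness_SIFTcols : List (List Int) := [[1, 2], [3, 4]]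

def Spec_SIFTcols (grid : List (List Int)) (out : List Int) : Prop := out = SIFTcols_alt grid
instance (grid : List (List Int)) (out : List Int) : Decidable (Spec_SIFTcols grid out) := by
  unfold Spec_SIFTcols; infer_instance

-- ===== CLAIM (what is proved, stated in full; the proofs are below) =====
def Claim_equal_SIFTcols : Prop :=
  ∀ (grid : List (List Int)), Dom_SIFTcols grid → Pre_SIFTcols grid →
    Spec_SIFTcols grid (SIFTcols grid)

-- ===== LEMMAS AND PROOFS =====

-- what A appends while scanning one column downward from row
def pvSeg (grid : List (List Int)) (col row : Int) : List Int :=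
  if h : 0 ≤ row ∧ pvCell grid row col ≠ -1 then
    row :: ((grid.length : Int) - 1 - row) :: pvSeg grid col (row - 1)
  else []
termination_by (row + 1).toNat
decreasing_by exact pvDecStep row h.1

-- A's accumulator after processing columns c, c-1, …, 0
def pvDown (grid : List (List Int)) : Nat → List Int
  | 0 => pvSeg grid 0 ((grid.length : Int) / 2 - 1)
  | c + 1 => pvSeg grid ((c : Int) + 1) ((grid.length : Int) / 2 - 1) ++ pvDown grid c

theorem pvFindStop_le (grid : List (List Int)) (col r : Int) :
    pvFindStop grid col r ≤ r := by
  rw [pvFindStop]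
  split_ifs with h
  · have ih := pvFindStop_le grid col (r - 1)
    omega
  · exact le_refl r
termination_by (r + 1).toNat
decreasing_by omega

-- inner-loop collapse: one column of A's while loop
theorem siftLoop_seg (grid : List (List Int)) (col row : Int) (cols : List Int)
    (hc : 0 ≤ col) :
    SIFTcolsLoop grid row col cols =
      SIFTcolsLoop grid ((grid.length : Int) / 2 - 1) (col - 1)
        (cols ++ pvSeg grid col row) := by
  by_cases h : 0 ≤ row ∧ pvCell grid row col ≠ -1
  · rw [SIFTcolsLoop, dif_pos hc, dif_pos ⟨h.2, h.1⟩,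
      siftLoop_seg grid col (row - 1) _ hc,
      show pvSeg grid col row
          = row :: ((grid.length : Int) - 1 - row) :: pvSeg grid col (row - 1) from
        by rw [pvSeg, dif_pos h]]
    simp
  · rw [SIFTcolsLoop, dif_pos hc, dif_neg (by tauto), pvSeg, dif_neg h]
    simp
termination_by (row + 1).toNat
decreasing_by omega

-- outer-loop collapse
theorem siftLoop_down (grid : List (List Int)) (c : Nat) (cols : List Int) :
    SIFTcolsLoop grid ((grid.length : Int) / 2 - 1) (c : Int) cols =
      (cols ++ pvDown grid c).reverse := by
  induction c generalizing cols with
  | zero =>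
    rw [Nat.cast_zero, siftLoop_seg grid 0 _ cols le_rfl]
    rw [SIFTcolsLoop, dif_neg (by omega)]
    rfl
  | succ c ih =>
    have h1 : ((c + 1 : Nat) : Int) = (c : Int) + 1 := by push_cast; ring
    rw [h1, siftLoop_seg grid ((c : Int) + 1) _ cols (by omega)]
    have h2 : (c : Int) + 1 - 1 = (c : Int) := by ring
    rw [h2, ih]
    simp [pvDown]

-- one column: A's reversed segment is B's forward pair list
theorem seg_reverse (grid : List (List Int)) (col r : Int) :
    (pvSeg grid col r).reverse =
      (PySem.List.pyRange (pvFindStop grid col r + 1) (r + 1) 1).flatMap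
        (fun row => [(grid.length : Int) - 1 - row, row]) := by
  by_cases h : 0 ≤ r ∧ pvCell grid r col ≠ -1
  · rw [pvSeg, dif_pos h, pvFindStop, dif_pos h]
    have hf := pvFindStop_le grid col (r - 1)
    have ih := seg_reverse grid col (r - 1)
    rw [PySem.List.pyRange_one_succ_right (by omega)]
    have h3 : r - 1 + 1 = r := by ring
    rw [h3] at ih
    simp [ih]
  · rw [pvSeg, dif_neg h, pvFindStop, dif_neg h]
    simp [PySem.List.pyRange_one_eq_nil le_rfl]
termination_by (r + 1).toNat
decreasing_by omega

theorem down_reverse (grid : List (List Int)) (c : Nat) :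
    (pvDown grid c).reverse =
      (PySem.List.pyRange 0 ((c : Int) + 1) 1).flatMap
        (fun col =>
          (PySem.List.pyRange (pvFindStop grid col ((grid.length : Int) / 2 - 1) + 1)
              ((grid.length : Int) / 2) 1).flatMap
            (fun row => [(grid.length : Int) - 1 - row, row])) := by
  induction c with
  | zero =>
    have h1 : (grid.length : Int) / 2 - 1 + 1 = (grid.length : Int) / 2 := by ring
    simp only [pvDown, seg_reverse, h1]
    rw [show ((0 : Nat) : Int) + 1 = (1 : Int) by norm_num]
    rw [show PySem.List.pyRange 0 (1 : Int) 1 = [(0 : Int)] from by decide]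
    simp
  | succ c ih =>
    have h1 : (((c + 1 : Nat)) : Int) + 1 = ((c : Int) + 1) + 1 := by push_cast; ring
    have h2 : (grid.length : Int) / 2 - 1 + 1 = (grid.length : Int) / 2 := by ring
    rw [h1, PySem.List.pyRange_one_succ_right (by omega)]
    simp only [pvDown, List.reverse_append, List.flatMap_append, ih, seg_reverse, h2]
    simp

-- ===== VERDICT (by name: the statement is the Claim_ definition above) =====
theorem SIFTcols_spec : Claim_equal_SIFTcols := by
  intro grid _dom pre
  obtain ⟨g0, rest, rfl⟩ := List.exists_cons_of_ne_nil pre.1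
  unfold Spec_SIFTcols SIFTcols SIFTcols_alt
  rw [PySem.List.pyGet?_zero_cons]
  simp only []
  rw [PySem.List.foldl_append_eq_flatMap]
  by_cases hw : g0.length = 0
  · rw [hw]
    rw [SIFTcolsLoop, dif_neg (by omega)]
    rw [PySem.List.pyRange_one_eq_nil (by norm_num)]
    simp
  · have h1 : ((g0.length : Int) - 1) = ((g0.length - 1 : Nat) : Int) := by omega
    rw [h1, siftLoop_down, List.nil_append, down_reverse]
    have h2 : ((g0.length - 1 : Nat) : Int) + 1 = (g0.length : Int) := by omega
    rw [h2]
    simp
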